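-- pv_equiv track=rewrite | github.com/sachinn854/SmartDocAI | backend/app/utils/chunker.py | _get_overlap_sentences
-- ===== SOURCE A (Python) =====
-- from typing import List, Dict
--
-- def count_words(text: str) -> int:
--     """
--     Count words in text.
--
--     Args:
--         text: Input text
--
--     Returns:
--         Word count
--     """
--     return len(text.split())
--
-- def _get_overlap_sentences(sentences: List[str], overlap_words: int) -> List[str]:
--     """
--     Get last N sentences that fit within overlap_words limit.
--
--     Args:
--         sentences: List of sentences
--         overlap_words: Maximum words for overlap
--
--     Returns:
--         List of sentences for overlap
--     """
--     if not sentences or overlap_words <= 0: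
--         return []
--
--     overlap_sentences = []
--     word_count = 0
--
--     # Work backwards from end
--     for sentence in reversed(sentences):
--         sentence_words = count_words(sentence)
--
--         if word_count + sentence_words <= overlap_words:
--             overlap_sentences.insert(0, sentence)
--             word_count += sentence_words
--         else:
--             break
--
--     return overlap_sentences
-- ===== SOURCE B (Python) =====
-- from typing import List
--
-- def count_words(text: str) -> int:
--     return len(text.split())
--
-- def _get_overlap_sentences(sentences: List[str], overlap_words: int) -> List[str]:
--     if not sentences or overlap_words <= 0:
--         return []
--     # counts table, then cumulative totals over the reversed counts, then slice
--     counts = [count_words(s) for s in sentences]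
--     totals = []
--     t = 0
--     for c in reversed(counts):
--         t += c
--         totals.append(t)
--     k = 0
--     for t in totals:
--         if t > overlap_words:
--             break
--         k += 1
--     return sentences[len(sentences) - k:]
-- ===== Notes on version B (the rewrite author's own statement) =====
-- stated objective: faster
-- what changed: B replaces A's backward loop that builds the result by repeated insert(0) (quadratic in the overlap length) with a three-stage pipeline: map sentences to a word-count table, accumulate totals over the reversed counts to find k, and return one final slice sentences[len-k:].
import Mathlib
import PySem

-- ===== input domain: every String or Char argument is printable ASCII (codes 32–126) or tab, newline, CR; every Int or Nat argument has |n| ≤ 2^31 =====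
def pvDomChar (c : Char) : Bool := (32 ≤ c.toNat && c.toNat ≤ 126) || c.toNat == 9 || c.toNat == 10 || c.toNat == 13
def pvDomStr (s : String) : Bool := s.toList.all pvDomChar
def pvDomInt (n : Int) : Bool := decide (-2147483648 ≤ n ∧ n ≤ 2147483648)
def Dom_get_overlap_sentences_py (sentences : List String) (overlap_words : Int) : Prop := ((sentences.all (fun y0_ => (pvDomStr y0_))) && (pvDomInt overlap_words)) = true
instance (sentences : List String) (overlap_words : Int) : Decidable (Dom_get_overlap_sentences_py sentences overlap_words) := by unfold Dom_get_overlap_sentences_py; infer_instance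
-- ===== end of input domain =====

-- B replaces the backward insert(0) loop (quadratic in the overlap length) with a counts table + cumulative totals + one final slice.


-- ===== PORT A =====
-- count_words(text) = len(text.split())
def countWordsPy (text : String) : Int := ((PySem.Str.split₀ text).length : Int)

-- A's backward loop: insert at front while the budget allows, break otherwise
def loopA (ov : Int) : List String → List String → Int → List String
  | [], acc, _ => acc
  | s :: rest, acc, wc =>
    let sw := countWordsPy s
    if wc + sw ≤ ov then loopA ov rest (s :: acc) (wc + sw) else acc

def get_overlap_sentences_py (sentences : List String) (overlap_words : Int) : List String :=
  if sentences = [] ∨ overlap_words ≤ 0 then []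
  else loopA overlap_words sentences.reverse [] 0

-- ===== PORT B =====
-- cumulative totals of the reversed counts (the `totals` list in Source B)
def pyAccum : List Int → Int → List Int
  | [], _ => []
  | c :: rest, t => (t + c) :: pyAccum rest (t + c)

-- number of leading totals that stay within the budget (the `k` loop in Source B)
def countK (ov : Int) : List Int → Nat
  | [] => 0
  | t :: rest => if t > ov then 0 else 1 + countK ov rest

def get_overlap_sentences_py_alt (sentences : List String) (overlap_words : Int) : List String :=
  if sentences = [] ∨ overlap_words ≤ 0 then []
  else
    let counts := sentences.map countWordsPy
    let totals := pyAccum counts.reverse 0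
    let k := countK overlap_words totals
    PySem.List.slice sentences (some ((sentences.length : Int) - (k : Int))) none

-- ===== PRECONDITION & SPEC =====
def Spec_get_overlap_sentences_py (sentences : List String) (overlap_words : Int) (out : List String) : Prop := out = get_overlap_sentences_py_alt sentences overlap_words
instance (sentences : List String) (overlap_words : Int) (out : List String) : Decidable (Spec_get_overlap_sentences_py sentences overlap_words out) := by unfold Spec_get_overlap_sentences_py; infer_instance

-- ===== CLAIM (what is proved, stated in full; the proofs are below) =====
def Claim_equal_get_overlap_sentences_py : Prop := ∀ (sentences : List String) (overlap_words : Int), Dom_get_overlap_sentences_py sentences overlap_words → Spec_get_overlap_sentences_py sentences overlap_words (get_overlap_sentences_py sentences overlap_words)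

-- ===== LEMMAS AND PROOFS =====

theorem countK_le_length (ov : Int) (ts : List Int) : countK ov ts ≤ ts.length := by
  induction ts with
  | nil => simp [countK]
  | cons t rest ih =>
    simp only [countK, List.length_cons]
    split <;> omega

theorem pyAccum_length (cs : List Int) (t : Int) : (pyAccum cs t).length = cs.length := by
  induction cs generalizing t with
  | nil => simp [pyAccum]
  | cons c rest ih => simp [pyAccum, ih]

theorem loopA_eq (ov : Int) (r : List String) (acc : List String) (wc : Int) :
    loopA ov r acc wc =
      (r.take (countK ov (pyAccum (r.map countWordsPy) wc))).reverse ++ acc := by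
  induction r generalizing acc wc with
  | nil => simp [loopA, pyAccum, countK]
  | cons s rest ih =>
    simp only [loopA, List.map_cons, pyAccum, countK]
    by_cases h : wc + countWordsPy s ≤ ov
    · rw [if_pos h, if_neg (by omega), ih]
      rw [Nat.add_comm 1 _, List.take_succ_cons, List.reverse_cons, List.append_assoc]
      rfl
    · rw [if_neg h, if_pos (by omega)]
      simp

theorem get_overlap_sentences_py_eq_alt (sentences : List String) (overlap_words : Int) :
    get_overlap_sentences_py sentences overlap_words =
      get_overlap_sentences_py_alt sentences overlap_words := by
  unfold get_overlap_sentences_py get_overlap_sentences_py_alt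
  split
  · rfl
  · simp only
    rw [loopA_eq]
    set k := countK overlap_words (pyAccum ((sentences.map countWordsPy).reverse) 0) with hk
    have hkle : k ≤ sentences.length := by
      have h1 := countK_le_length overlap_words (pyAccum ((sentences.map countWordsPy).reverse) 0)
      have h2 := pyAccum_length ((sentences.map countWordsPy).reverse) 0
      simp at h2
      omega
    have hcast : (sentences.length : Int) - (k : Int) = ((sentences.length - k : Nat) : Int) := by
      push_cast [Nat.cast_sub hkle]; ring
    rw [List.map_reverse, hcast, PySem.List.slice_from_natCast]
    rw [List.take_reverse]
    simp [← hk]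

-- ===== VERDICT (by name: the statement is the Claim_ definition above) =====
theorem get_overlap_sentences_py_spec : Claim_equal_get_overlap_sentences_py := by
  intro sentences overlap_words _
  exact get_overlap_sentences_py_eq_alt sentences overlap_words
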